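-- pv_equiv track=rewrite | github.com/jarrodhurteau/ServLine | storage/import_jobs.py | _detect_header_mapping
-- ===== SOURCE A (Python) =====
-- from typing import Any, Dict, List, Optional, Set, Tuple
--
-- HEADER_ALIASES: Dict[str, Set[str]] = {
--     "name": {
--         "name",
--         "item",
--         "itemname",
--         "item_name",
--         "itemtitle",
--         "title",
--         "menuitem",
--     },
--     "description": {
--         "description",
--         "desc",
--         "details",
--         "detail",
--         "itemdescription",
--     },
--     "category": {
--         "category",
--         "cat",
--         "section",
--         "group",
--         "menu_section",
--         "menu_group",
--     },
--     "subcategory": {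
--         "subcategory",
--         "subcat",
--         "sub_category",
--         "subsection",
--         "sub_section",
--     },
--     "price": {
--         "price",
--         "cost",
--         "amount",
--         "baseprice",
--         "base_price",
--         "listprice",
--     },
--     "price_cents": {
--         "pricecents",
--         "price_cents",
--     },
--     "size": {
--         "size",
--         "portion",
--         "variant",
--         "serving",
--     },
--     "sku": {
--         "sku",
--         "code",
--         "plu",
--         "itemcode",
--         "item_code",
--     },
-- }
--
-- def _normalize_header(h: str) -> str:
--     """
--     Normalize a header to a simple token for alias matching.
--     """
--     return "".join(ch for ch in h.lower() if ch.isalnum())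
--
-- def _detect_header_mapping(headers: List[str]) -> Dict[str, str]:
--     """
--     Detect which headers correspond to canonical structured fields.
--
--     Returns mapping:
--
--         { canonical_field: original_header }
--
--     """
--     mapping: Dict[str, str] = {}
--
--     if not headers:
--         return mapping
--
--     normalized: Dict[str, str] = {h: _normalize_header(h) for h in headers}
--
--     for canonical, aliases in HEADER_ALIASES.items():
--         for header, norm in normalized.items():
--             if norm in aliases:
--                 mapping[canonical] = header
--                 break
--
--     return mapping
-- ===== SOURCE B (Python) =====
-- from typing import Dict, List
--
-- # Flat inverted index: alias token -> canonical field (alias sets are disjoint).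
-- ALIAS_TO_CANONICAL: Dict[str, str] = {
--     "name": "name", "item": "name", "itemname": "name", "item_name": "name",
--     "itemtitle": "name", "title": "name", "menuitem": "name",
--     "description": "description", "desc": "description", "details": "description",
--     "detail": "description", "itemdescription": "description",
--     "category": "category", "cat": "category", "section": "category",
--     "group": "category", "menu_section": "category", "menu_group": "category",
--     "subcategory": "subcategory", "subcat": "subcategory", "sub_category": "subcategory",
--     "subsection": "subcategory", "sub_section": "subcategory",
--     "price": "price", "cost": "price", "amount": "price", "baseprice": "price",
--     "base_price": "price", "listprice": "price",
--     "pricecents": "price_cents", "price_cents": "price_cents",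
--     "size": "size", "portion": "size", "variant": "size", "serving": "size",
--     "sku": "sku", "code": "sku", "plu": "sku", "itemcode": "sku", "item_code": "sku",
-- }
--
-- CANONICAL_FIELDS: List[str] = [
--     "name", "description", "category", "subcategory",
--     "price", "price_cents", "size", "sku",
-- ]
--
-- def _normalize_header(h: str) -> str:
--     return "".join(ch for ch in h.lower() if ch.isalnum())
--
-- def _detect_header_mapping(headers: List[str]) -> Dict[str, str]:
--     if not headers:
--         return {}
--     best: Dict[str, str] = {}
--     for h in headers:
--         c = ALIAS_TO_CANONICAL.get(_normalize_header(h))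
--         if c is not None and c not in best:
--             best[c] = h
--     return {c: best[c] for c in CANONICAL_FIELDS if c in best}
-- ===== Notes on version B (the rewrite author's own statement) =====
-- stated objective: alternative
-- what changed: Replaces A's nested scan (each of the 8 canonical fields scanning all normalized headers) by a precomputed flat alias-to-canonical inverted dict and a single first-wins pass over the headers.
import Mathlib
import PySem

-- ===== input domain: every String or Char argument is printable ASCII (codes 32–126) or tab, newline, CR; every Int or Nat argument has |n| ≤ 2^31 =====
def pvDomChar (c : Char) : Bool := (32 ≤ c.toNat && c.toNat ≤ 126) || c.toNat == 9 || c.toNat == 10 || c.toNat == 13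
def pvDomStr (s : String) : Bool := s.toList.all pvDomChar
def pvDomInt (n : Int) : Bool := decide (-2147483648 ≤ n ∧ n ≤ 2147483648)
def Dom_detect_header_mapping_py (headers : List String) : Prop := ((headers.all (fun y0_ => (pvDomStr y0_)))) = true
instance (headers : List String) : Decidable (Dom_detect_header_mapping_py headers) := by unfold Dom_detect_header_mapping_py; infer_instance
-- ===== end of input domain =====

-- B replaces A's nested scan (every canonical field × every normalized header) by a flat
-- inverted alias→canonical dict and a single first-wins pass over the headers (alternative decomposition).

-- ===== PORT A =====
-- "".join(ch for ch in h.lower() if ch.isalnum())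
def normalizeHeader (h : String) : String :=
  String.ofList ((PySem.Str.lower h).toList.filter PySem.Chars.isalnum)

-- HEADER_ALIASES (sets used only for membership)
def headerAliases : List (String × PySem.Set String) :=
  [ ("name", PySem.Set.ofList ["name", "item", "itemname", "item_name", "itemtitle", "title", "menuitem"]),
    ("description", PySem.Set.ofList ["description", "desc", "details", "detail", "itemdescription"]),
    ("category", PySem.Set.ofList ["category", "cat", "section", "group", "menu_section", "menu_group"]),
    ("subcategory", PySem.Set.ofList ["subcategory", "subcat", "sub_category", "subsection", "sub_section"]),
    ("price", PySem.Set.ofList ["price", "cost", "amount", "baseprice", "base_price", "listprice"]),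
    ("price_cents", PySem.Set.ofList ["pricecents", "price_cents"]),
    ("size", PySem.Set.ofList ["size", "portion", "variant", "serving"]),
    ("sku", PySem.Set.ofList ["sku", "code", "plu", "itemcode", "item_code"]) ]

-- the inner 'for header, norm in normalized.items(): if norm in aliases: …; break' loop
def findAliasPair (aliases : PySem.Set String) : List (String × String) → Option (String × String)
  | [] => none
  | (h, n) :: rest =>
    if PySem.Set.contains aliases n then some (h, n) else findAliasPair aliases rest

def detect_header_mapping_py (headers : List String) : List (String × String) :=
  match headers with
  | [] => (PySem.Dict.empty : PySem.Dict String String).items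
  | _ =>
    -- normalized = {h: _normalize_header(h) for h in headers}
    let normalized : PySem.Dict String String :=
      headers.foldl (fun d h => d.insert h (normalizeHeader h)) PySem.Dict.empty
    -- for canonical, aliases in HEADER_ALIASES.items(): … break
    let mapping : PySem.Dict String String :=
      headerAliases.foldl (fun m ca =>
        match findAliasPair ca.2 normalized.items with
        | some hn => m.insert ca.1 hn.1
        | none => m) PySem.Dict.empty
    mapping.items

-- ===== PORT B =====
-- B's own copy of _normalize_header
def normalizeHeaderB (h : String) : String :=
  String.ofList ((PySem.Str.lower h).toList.filter PySem.Chars.isalnum)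

-- ALIAS_TO_CANONICAL: flat inverted dict literal
def aliasToCanonical : PySem.Dict String String :=
  PySem.Dict.mk
    [ ("name", "name"), ("item", "name"), ("itemname", "name"), ("item_name", "name"),
      ("itemtitle", "name"), ("title", "name"), ("menuitem", "name"),
      ("description", "description"), ("desc", "description"), ("details", "description"),
      ("detail", "description"), ("itemdescription", "description"),
      ("category", "category"), ("cat", "category"), ("section", "category"),
      ("group", "category"), ("menu_section", "category"), ("menu_group", "category"),
      ("subcategory", "subcategory"), ("subcat", "subcategory"), ("sub_category", "subcategory"),
      ("subsection", "subcategory"), ("sub_section", "subcategory"),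
      ("price", "price"), ("cost", "price"), ("amount", "price"), ("baseprice", "price"),
      ("base_price", "price"), ("listprice", "price"),
      ("pricecents", "price_cents"), ("price_cents", "price_cents"),
      ("size", "size"), ("portion", "size"), ("variant", "size"), ("serving", "size"),
      ("sku", "sku"), ("code", "sku"), ("plu", "sku"), ("itemcode", "sku"), ("item_code", "sku") ]

def canonicalFields : List String :=
  ["name", "description", "category", "subcategory", "price", "price_cents", "size", "sku"]

def detect_header_mapping_py_alt (headers : List String) : List (String × String) :=
  match headers with
  | [] => []
  | _ :: _ =>
    -- single first-wins pass over the headers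
    let best : PySem.Dict String String :=
      headers.foldl (fun b h =>
        match aliasToCanonical.get? (normalizeHeaderB h) with
        | some c => if b.contains c then b else b.insert c h
        | none => b) PySem.Dict.empty
    -- {c: best[c] for c in CANONICAL_FIELDS if c in best}
    (canonicalFields.foldl (fun m c =>
      match best.get? c with
      | some v => m.insert c v
      | none => m) PySem.Dict.empty).items

-- ===== PRECONDITION & SPEC =====
def Spec_detect_header_mapping_py (headers : List String) (out : List (String × String)) : Prop := out = detect_header_mapping_py_alt headers
instance (headers : List String) (out : List (String × String)) : Decidable (Spec_detect_header_mapping_py headers out) := by unfold Spec_detect_header_mapping_py; infer_instance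

-- ===== CLAIM (what is proved, stated in full; the proofs are below) =====
def Claim_equal_detect_header_mapping_py : Prop := ∀ (headers : List String), Dom_detect_header_mapping_py headers → Spec_detect_header_mapping_py headers (detect_header_mapping_py headers)

-- ===== LEMMAS AND PROOFS =====

lemma normB_eq : normalizeHeaderB = normalizeHeader := rfl

-- re-inserting an existing binding leaves the dict unchanged
lemma insert_mem_self (d : PySem.Dict String String) (k v : String)
    (hnd : d.keys.Nodup) (hm : (k, v) ∈ d.items) : d.insert k v = d := by
  have hc : d.contains k = true :=
    (PySem.Dict.contains_iff_mem_keys d k).2 (PySem.Dict.mem_keys_of_mem_items d hm)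
  apply PySem.Dict.ext
  rw [PySem.Dict.items_insert_of_contains d v hc]
  conv_rhs => rw [← List.map_id d.items]
  apply List.map_congr_left
  intro p hp
  obtain ⟨p1, p2⟩ := p
  by_cases h1 : p1 = k
  · subst h1
    have h3 : d.get? p1 = some p2 := PySem.Dict.get?_of_mem_items d hp hnd
    have h2 : d.get? p1 = some v := PySem.Dict.get?_of_mem_items d hm hnd
    rw [h2] at h3
    simp [Option.some_inj.1 h3]
  · simp [h1]

-- A's break-loop is find?
lemma findAliasPair_eq_find? (S : PySem.Set String) (l : List (String × String)) :
    findAliasPair S l = l.find? (fun p => PySem.Set.contains S p.2) := by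
  induction l with
  | nil => rfl
  | cons p rest ih =>
    obtain ⟨h, n⟩ := p
    by_cases hc : n ∈ S <;> simp [findAliasPair, PySem.Set.contains, hc, ih]

-- searching the items of A's normalized dict = searching the headers themselves
lemma normFold_find (q : String → Bool) (hs : List String) : ∀ (d : PySem.Dict String String),
    d.keys.Nodup → (∀ p ∈ d.items, p.2 = normalizeHeader p.1) →
    (hs.foldl (fun d h => d.insert h (normalizeHeader h)) d).items.find? (fun p => q p.2)
      = (d.items.find? (fun p => q p.2)).or
          ((hs.find? (fun h => q (normalizeHeader h))).map (fun h => (h, normalizeHeader h))) := by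
  induction hs with
  | nil => intro d _ _; simp
  | cons h t ih =>
    intro d hnd hv
    by_cases hc : d.contains h = true
    · -- existing key: the stored value is already normalizeHeader h, the insert is a no-op
      obtain ⟨v, hvmem⟩ : ∃ v, (h, v) ∈ d.items := by
        rw [PySem.Dict.contains_iff_mem_keys] at hc
        simp only [PySem.Dict.keys, List.mem_map] at hc
        obtain ⟨p, hp, hp1⟩ := hc
        exact ⟨p.2, by simpa [← hp1] using hp⟩
      have hveq : v = normalizeHeader h := hv _ hvmem
      subst hveq
      have hins : d.insert h (normalizeHeader h) = d := insert_mem_self d _ _ hnd hvmem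
      simp only [List.foldl_cons, hins]
      rw [ih d hnd hv, List.find?_cons]
      by_cases hq : q (normalizeHeader h) = true
      · have hex : ∃ p, p ∈ d.items ∧ (fun p : String × String => q p.2) p = true :=
          ⟨(h, normalizeHeader h), hvmem, hq⟩
        rw [← List.find?_isSome] at hex
        obtain ⟨r, hr⟩ := Option.isSome_iff_exists.1 hex
        simp [hr, hq]
      · simp [hq]
    · -- fresh key: items append
      have hndi : (d.insert h (normalizeHeader h)).keys.Nodup := PySem.Dict.nodup_keys_insert d _ _ hnd
      have hvi : ∀ p ∈ (d.insert h (normalizeHeader h)).items, p.2 = normalizeHeader p.1 := by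
        intro p hp
        rcases (PySem.Dict.mem_items_insert d _ _ p).1 hp with h1 | ⟨h1, _⟩
        · subst h1; rfl
        · exact hv _ h1
      simp only [List.foldl_cons]
      rw [ih _ hndi hvi,
          PySem.Dict.items_insert_of_not_contains d _ (by simpa using hc),
          List.find?_append, List.find?_cons]
      by_cases hq : q (normalizeHeader h) = true <;> simp [hq]

-- B's first-wins pass: lookup of a canonical = first header mapping to it
lemma bestFold_get? (c : String) (hs : List String) : ∀ (b : PySem.Dict String String),
    (hs.foldl (fun b h =>
        match aliasToCanonical.get? (normalizeHeader h) with
        | some c' => if b.contains c' then b else b.insert c' h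
        | none => b) b).get? c
      = (b.get? c).or (hs.find? (fun h => aliasToCanonical.get? (normalizeHeader h) == some c)) := by
  induction hs with
  | nil => intro b; simp
  | cons h t ih =>
    intro b
    simp only [List.foldl_cons, List.find?_cons]
    cases hg : aliasToCanonical.get? (normalizeHeader h) with
    | none => simp [ih]
    | some c' =>
      by_cases hcc : c' = c
      · subst hcc
        simp only [beq_self_eq_true]
        by_cases hb : b.contains c' = true
        · have hbs : (b.get? c').isSome := by
            rw [Option.isSome_iff_ne_none]
            intro hnone
            rw [PySem.Dict.get?_eq_none_iff_contains] at hnone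
            simp [hnone] at hb
          rw [if_pos hb, ih]
          obtain ⟨r, hr⟩ := Option.isSome_iff_exists.1 hbs
          simp [hr]
        · rw [if_neg hb, ih, PySem.Dict.get?_insert_self]
          have hnone : b.get? c' = none := (PySem.Dict.get?_eq_none_iff_contains b c').2 (by simpa using hb)
          simp [hnone]
      · have hne : (some c' == some c) = false := by simp [hcc]
        have hred : (match some c' with
            | some c'' => if b.contains c'' = true then b else b.insert c'' h
            | none => (b : PySem.Dict String String)) = if b.contains c' = true then b else b.insert c' h := rfl
        rw [hne, hred]
        by_cases hb : b.contains c' = true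
        · rw [if_pos hb, ih]
        · rw [if_neg hb, ih, PySem.Dict.get?_insert_of_ne b h (fun e => hcc e.symm)]

-- the alias sets partition the alias tokens exactly as the inverted dict does
lemma alias_fwd : ∀ p ∈ headerAliases, ∀ x ∈ p.2, (x, p.1) ∈ aliasToCanonical.items := by decide
lemma alias_bwd : ∀ q ∈ aliasToCanonical.items, ∀ p ∈ headerAliases, q.2 = p.1 → q.1 ∈ p.2 := by decide
lemma inv_nodup : aliasToCanonical.keys.Nodup := by decide

-- set membership in a canonical's alias set = inverted-dict lookup returning that canonical
lemma alias_inv (c : String) (S : PySem.Set String) (hmem : (c, S) ∈ headerAliases) (n : String) :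
    PySem.Set.contains S n = (aliasToCanonical.get? n == some c) := by
  rw [Bool.eq_iff_iff]
  constructor
  · intro hc
    have hn : n ∈ S := by simpa [PySem.Set.contains] using hc
    have hmem2 := alias_fwd (c, S) hmem n hn
    simp [PySem.Dict.get?_of_mem_items _ hmem2 inv_nodup]
  · intro hg
    have hg' : aliasToCanonical.get? n = some c := by simpa using hg
    have hx := alias_bwd (n, c) (PySem.Dict.mem_items_of_get?_eq_some _ hg') (c, S) hmem rfl
    simpa [PySem.Set.contains] using hx

-- ===== VERDICT (by name: the statement is the Claim_ definition above) =====
theorem detect_header_mapping_py_spec : Claim_equal_detect_header_mapping_py := by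
  intro headers _
  unfold Spec_detect_header_mapping_py
  cases headers with
  | nil => rfl
  | cons a t =>
    unfold detect_header_mapping_py detect_header_mapping_py_alt
    simp only [normB_eq]
    -- rewrite A's per-canonical inner scan to a direct scan of the headers
    rw [PySem.List.foldl_congr_mem headerAliases _
        (fun m ca =>
          match (a :: t).find? (fun h => aliasToCanonical.get? (normalizeHeader h) == some ca.1) with
          | some h => m.insert ca.1 h
          | none => m)
        PySem.Dict.empty ?hA]
    case hA =>
      intro m ca hca
      have h2 := normFold_find (fun x => PySem.Set.contains ca.2 x) (a :: t) PySem.Dict.empty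
        (by simp [PySem.Dict.empty, PySem.Dict.keys]) (by simp [PySem.Dict.empty])
      have hpred : (fun h => PySem.Set.contains ca.2 (normalizeHeader h))
          = (fun h => aliasToCanonical.get? (normalizeHeader h) == some ca.1) :=
        funext fun h => alias_inv ca.1 ca.2 (by simpa using hca) (normalizeHeader h)
      rw [findAliasPair_eq_find?]
      simp only [hpred] at h2
      rw [h2]
      cases hf : (a :: t).find? (fun h => aliasToCanonical.get? (normalizeHeader h) == some ca.1) <;>
        simp [hf, PySem.Dict.empty]
    -- rewrite B's lookups in best to the same direct scan
    rw [PySem.List.foldl_congr_mem canonicalFields _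
        (fun m c =>
          match (a :: t).find? (fun h => aliasToCanonical.get? (normalizeHeader h) == some c) with
          | some v => m.insert c v
          | none => m)
        PySem.Dict.empty ?hB]
    case hB =>
      intro m c _
      rw [bestFold_get? c (a :: t) PySem.Dict.empty,
          show (PySem.Dict.empty : PySem.Dict String String).get? c = none from rfl,
          Option.none_or]
    -- the two folds are now the same fold: canonicalFields = map fst of headerAliases
    rw [show canonicalFields = headerAliases.map Prod.fst from rfl, List.foldl_map]
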